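-- pv_equiv track=rewrite | github.com/kuramochi-coder/Algorithms-Data-Structures | practice/graphs.py | find_adjacent_nodes
-- ===== SOURCE A (Python) =====
-- edges = [
--     ['A', 'B'],
--     ['A', 'D'],
--     ['B', 'C'],
--     ['C', 'D'],
--     ['C', 'E'],
--     ['D', 'E']
-- ]
--
-- def find_adjacent_nodes(node):
--
--     adjacent_nodes = []
--
--     for edge in edges:
--         try:
--             node_index = edge.index(node)
--         except ValueError:
--             node_index = None
--
--         if node_index is not None:
--             adjacent_node = edge[1] if node_index == 0 else edge[0]
--             adjacent_nodes.append(adjacent_node)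
--
--     return adjacent_nodes
-- ===== SOURCE B (Python) =====
-- edges = [
--     ['A', 'B'],
--     ['A', 'D'],
--     ['B', 'C'],
--     ['C', 'D'],
--     ['C', 'E'],
--     ['D', 'E']
-- ]
--
-- # Adjacency table built once at module load; the function is a single dict lookup.
-- _adj = {}
-- for u, v in edges:
--     _adj.setdefault(u, []).append(v)
--     _adj.setdefault(v, []).append(u)
--
-- def find_adjacent_nodes(node):
--     return list(_adj.get(node, []))
-- ===== Notes on version B (the rewrite author's own statement) =====
-- stated objective: idiomatic
-- what changed: B precomputes an adjacency dict once over the edge list (appending each endpoint to the other's list) and the function itself is just a dict lookup returning a fresh copy, instead of A's per-call scan of every edge with try/except around list.index.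
import Mathlib
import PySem

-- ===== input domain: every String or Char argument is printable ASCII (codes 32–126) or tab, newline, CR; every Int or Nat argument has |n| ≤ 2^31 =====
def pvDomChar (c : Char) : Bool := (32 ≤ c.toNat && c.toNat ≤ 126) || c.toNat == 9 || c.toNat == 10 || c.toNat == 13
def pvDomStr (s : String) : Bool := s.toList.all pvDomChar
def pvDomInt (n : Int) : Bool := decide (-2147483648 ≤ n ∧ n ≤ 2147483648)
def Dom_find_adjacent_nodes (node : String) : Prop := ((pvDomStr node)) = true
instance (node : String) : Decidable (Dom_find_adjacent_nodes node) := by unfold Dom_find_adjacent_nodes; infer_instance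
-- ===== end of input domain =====

-- B replaces A's per-call scan (try/except around list.index on every edge) by a
-- precomputed adjacency dict, so the function is a single lookup (objective: idiomatic).

-- ===== PORT A =====
def pvEdges : List (List String) :=
  [["A", "B"], ["A", "D"], ["B", "C"], ["C", "D"], ["C", "E"], ["D", "E"]]

-- edge[1] / edge[0]: every edge in the fixed literal list has length 2, so the
-- Python indexing never raises; '.getD ""' is exact here (the default is unreachable).
def find_adjacent_nodes (node : String) : List String :=
  pvEdges.foldl (fun adjacent_nodes edge =>
    match PySem.List.index? edge node with
    | none => adjacent_nodes
    | some node_index =>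
        adjacent_nodes ++
          [(PySem.List.pyGet? edge (if node_index = 0 then 1 else 0)).getD ""]) []

-- ===== PORT B =====
def pvAdj : PySem.Dict String (List String) :=
  pvEdges.foldl (fun d edge =>
    match edge with
    | [u, v] => (d.modify u [] (· ++ [v])).modify v [] (· ++ [u])
    | _ => d) PySem.Dict.empty

def find_adjacent_nodes_alt (node : String) : List String :=
  pvAdj.getD node []

-- ===== PRECONDITION & SPEC =====
def Spec_find_adjacent_nodes (node : String) (out : List String) : Prop := out = find_adjacent_nodes_alt node
instance (node : String) (out : List String) : Decidable (Spec_find_adjacent_nodes node out) := by unfold Spec_find_adjacent_nodes; infer_instance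

-- ===== CLAIM (what is proved, stated in full; the proofs are below) =====
def Claim_equal_find_adjacent_nodes : Prop := ∀ (node : String), Dom_find_adjacent_nodes node → Spec_find_adjacent_nodes node (find_adjacent_nodes node)

-- ===== LEMMAS AND PROOFS =====
lemma pvAdj_eval : pvAdj = PySem.Dict.mk
    [("A", ["B", "D"]), ("B", ["A", "C"]), ("D", ["A", "C", "E"]),
     ("C", ["B", "D", "E"]), ("E", ["C", "D"])] := by decide

-- ===== VERDICT (by name: the statement is the Claim_ definition above) =====
theorem find_adjacent_nodes_spec : Claim_equal_find_adjacent_nodes := by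
  intro node _
  unfold Spec_find_adjacent_nodes
  by_cases hA : node = "A"; · subst hA; decide
  by_cases hB : node = "B"; · subst hB; decide
  by_cases hC : node = "C"; · subst hC; decide
  by_cases hD : node = "D"; · subst hD; decide
  by_cases hE : node = "E"; · subst hE; decide
  have hi : ∀ e, node ∉ e → List.idxOf? node e = none := by
    intro e he
    rw [List.idxOf?_eq_none_iff]
    exact he
  have hA' : "A" ≠ node := fun h => hA h.symm
  have hB' : "B" ≠ node := fun h => hB h.symm
  have hC' : "C" ≠ node := fun h => hC h.symm
  have hD' : "D" ≠ node := fun h => hD h.symm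
  have hE' : "E" ≠ node := fun h => hE h.symm
  simp [find_adjacent_nodes, find_adjacent_nodes_alt, pvAdj_eval,
    PySem.Dict.getD, PySem.Dict.get?, PySem.Dict.get?_mk_cons, pvEdges,
    hi ["A", "B"] (by simp [hA, hB]), hi ["A", "D"] (by simp [hA, hD]),
    hi ["B", "C"] (by simp [hB, hC]), hi ["C", "D"] (by simp [hC, hD]),
    hi ["C", "E"] (by simp [hC, hE]), hi ["D", "E"] (by simp [hD, hE]),
    hA', hB', hC', hD', hE']
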